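-- pv_equiv track=rewrite | github.com/tomp/AOC-2020 | day6/day6.py | parse_answers2
-- ===== SOURCE A (Python) =====
-- def parse_answers2(lines):
--     groups = []
--     group = set()
--     bad_group = False
--     for line in lines:
--         line = line.strip()
--         if not line:
--             if group:
--                 groups.append(group)
--                 group = set()
--             bad_group = False
--             continue
--         if bad_group:
--             continue
--         if not group:
--             group = set(line)
--         else:
--             group &= set(line)
--             if not group:
--                 bad_group = True
--     if group:
--         groups.append(group)
--     return groups
-- ===== SOURCE B (Python) =====
-- from functools import reduce
--
-- def parse_answers2(lines):
--     # Partition into groups of stripped non-empty lines, then reduce each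
--     # group by set intersection; keep only non-empty intersections.
--     groups = []
--     cur = []
--     for line in lines:
--         s = line.strip()
--         if s:
--             cur.append(s)
--         else:
--             if cur:
--                 groups.append(cur)
--             cur = []
--     if cur:
--         groups.append(cur)
--     sets = [reduce(lambda a, b: a & b, map(set, g)) for g in groups]
--     return [s for s in sets if s]
-- ===== Notes on version B (the rewrite author's own statement) =====
-- stated objective: simpler
-- what changed: B first partitions the lines into groups and then reduces each group by set intersection (keeping non-empty results), replacing A's single pass with its bad_group flag and incremental group &= state.
import Mathlib
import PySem

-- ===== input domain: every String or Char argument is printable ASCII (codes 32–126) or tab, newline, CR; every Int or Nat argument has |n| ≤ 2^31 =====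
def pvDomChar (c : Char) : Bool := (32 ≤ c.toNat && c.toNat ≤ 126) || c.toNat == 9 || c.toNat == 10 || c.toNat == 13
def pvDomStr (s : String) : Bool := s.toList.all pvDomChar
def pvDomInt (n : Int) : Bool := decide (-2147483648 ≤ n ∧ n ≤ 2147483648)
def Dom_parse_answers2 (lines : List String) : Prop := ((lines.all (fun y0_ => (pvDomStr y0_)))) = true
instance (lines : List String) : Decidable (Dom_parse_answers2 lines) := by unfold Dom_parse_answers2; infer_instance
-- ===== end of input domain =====

-- B replaces A's one-pass flag machinery (`bad_group`, incremental `group &=`) by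
-- first partitioning the lines into groups and then reducing each group by set
-- intersection; objective: simpler decomposition, same cost.

-- set(line) for a Python str: the distinct one-character strings, first occurrences in order
def pvSetOf (s : String) : PySem.Set String :=
  PySem.Set.ofList (s.toList.map (fun c => String.ofList [c]))

-- ===== PORT A =====
def pvStepA (st : List (List String) × List String × Bool) (line : String) :
    List (List String) × List String × Bool :=
  let groups := st.1
  let group := st.2.1
  let bad := st.2.2
  let s := PySem.Str.strip line
  if s = "" then
    ((if group.isEmpty then groups else groups ++ [group]), [], false)
  else if bad then st
  else if group.isEmpty then (groups, pvSetOf s, bad)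
  else
    let g := PySem.Set.inter group (pvSetOf s)
    (groups, g, g.isEmpty)

def parse_answers2 (lines : List String) : List (List String) :=
  let st := lines.foldl pvStepA ([], [], false)
  if st.2.1.isEmpty then st.1 else st.1 ++ [st.2.1]

-- ===== PORT B =====
def pvStepB (st : List (List String) × List String) (line : String) :
    List (List String) × List String :=
  let s := PySem.Str.strip line
  if s = "" then ((if st.2.isEmpty then st.1 else st.1 ++ [st.2]), [])
  else (st.1, st.2 ++ [s])

-- reduce(lambda a, b: a & b, map(set, g)) — groups are never empty
def pvReduceInter (g : List String) : List String :=
  match g with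
  | [] => []
  | l :: ls => ls.foldl (fun a b => PySem.Set.inter a (pvSetOf b)) (pvSetOf l)

def parse_answers2_alt (lines : List String) : List (List String) :=
  let st := lines.foldl pvStepB ([], [])
  let groups := if st.2.isEmpty then st.1 else st.1 ++ [st.2]
  let sets := groups.map pvReduceInter
  sets.filter (fun s => !s.isEmpty)

-- ===== PRECONDITION & SPEC =====
def Spec_parse_answers2 (lines : List String) (out : List (List String)) : Prop := out = parse_answers2_alt lines
instance (lines : List String) (out : List (List String)) : Decidable (Spec_parse_answers2 lines out) := by unfold Spec_parse_answers2; infer_instance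

-- ===== CLAIM (what is proved, stated in full; the proofs are below) =====
def Claim_equal_parse_answers2 : Prop := ∀ (lines : List String), Dom_parse_answers2 lines → Spec_parse_answers2 lines (parse_answers2 lines)

-- ===== LEMMAS AND PROOFS =====

-- emit: what B does to a list of collected groups
def pvEmit (gs : List (List String)) : List (List String) :=
  (gs.map pvReduceInter).filter (fun s => !s.isEmpty)

lemma pvEmit_append_group (gs : List (List String)) (cur : List String) :
    pvEmit (gs ++ [cur]) =
      pvEmit gs ++ (if (pvReduceInter cur).isEmpty then [] else [pvReduceInter cur]) := by
  unfold pvEmit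
  rw [List.map_append, List.filter_append]
  cases h : (pvReduceInter cur).isEmpty <;> simp [h]

lemma pvSetOf_ne_nil (s : String) (h : s ≠ "") : (pvSetOf s).isEmpty = false := by
  have hl : s.toList ≠ [] := fun h' => h (by rw [← String.toList_inj]; simp [h'])
  rw [List.isEmpty_eq_false_iff_exists_mem]
  obtain ⟨c, hc⟩ := List.exists_mem_of_ne_nil s.toList hl
  exact ⟨String.ofList [c], by simp [pvSetOf, PySem.Set.mem_ofList]; exact ⟨c, hc, rfl⟩⟩

lemma pvInter_nil (t : List String) : PySem.Set.inter ([] : List String) t = [] := by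
  simp [PySem.Set.inter]

lemma pvReduceInter_append (cur : List String) (s : String) :
    pvReduceInter (cur ++ [s]) =
      if cur.isEmpty then pvSetOf s else PySem.Set.inter (pvReduceInter cur) (pvSetOf s) := by
  cases cur with
  | nil => simp [pvReduceInter]
  | cons l ls => simp [pvReduceInter, List.foldl_append]

-- the bad flag of A as a function of the current group's lines
def pvBad (cur : List String) : Bool := !cur.isEmpty && (pvReduceInter cur).isEmpty

lemma pv_loop (lines : List String) (gs : List (List String)) (cur : List String) :
    (let st := lines.foldl pvStepA (pvEmit gs, pvReduceInter cur, pvBad cur)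
     if st.2.1.isEmpty then st.1 else st.1 ++ [st.2.1]) =
    (let st := lines.foldl pvStepB (gs, cur)
     pvEmit (if st.2.isEmpty then st.1 else st.1 ++ [st.2])) := by
  induction lines generalizing gs cur with
  | nil =>
    simp only [List.foldl_nil]
    cases hc : cur with
    | nil => simp [pvReduceInter, pvEmit]
    | cons l ls =>
      simp only [List.isEmpty_cons, Bool.false_eq_true, if_false]
      rw [pvEmit_append_group]
      cases h : (pvReduceInter (l :: ls)).isEmpty <;> simp [h]
  | cons line rest ih =>
    simp only [List.foldl_cons]
    by_cases hs : PySem.Str.strip line = ""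
    · -- blank line: both close the current group
      have hA : pvStepA (pvEmit gs, pvReduceInter cur, pvBad cur) line =
          (pvEmit (if cur.isEmpty then gs else gs ++ [cur]), pvReduceInter ([] : List String), pvBad []) := by
        cases hc : cur with
        | nil => simp [pvStepA, hs, pvReduceInter, pvBad, pvEmit]
        | cons l ls =>
          simp only [pvStepA, hs, if_pos, List.isEmpty_cons, Bool.false_eq_true, if_false]
          rw [pvEmit_append_group]
          simp only [pvReduceInter, pvBad, List.isEmpty_nil]
          cases h : (pvReduceInter (l :: ls)).isEmpty <;> simp [pvReduceInter] at h ⊢ <;> simp_all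
      have hB : pvStepB (gs, cur) line =
          ((if cur.isEmpty then gs else gs ++ [cur]), []) := by
        simp [pvStepB, hs]
      rw [hA, hB, ih]
    · -- non-blank line
      have hA : pvStepA (pvEmit gs, pvReduceInter cur, pvBad cur) line =
          (pvEmit gs, pvReduceInter (cur ++ [PySem.Str.strip line]),
            pvBad (cur ++ [PySem.Str.strip line])) := by
        cases hbad : pvBad cur with
        | true =>
          have hcur : cur.isEmpty = false := by
            cases h : cur.isEmpty <;> simp [pvBad, h] at hbad ⊢
          have hred : (pvReduceInter cur).isEmpty = true := by
            simp [pvBad, hcur] at hbad; simp [hbad]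
          have hred' : pvReduceInter cur = [] := by
            simpa [List.isEmpty_iff] using hred
          have h2 : pvReduceInter (cur ++ [PySem.Str.strip line]) = [] := by
            rw [pvReduceInter_append, hcur]
            simp [hred', pvInter_nil]
          simp [pvStepA, hs, hred', pvBad, h2]
        | false =>
          cases hcur : cur.isEmpty with
          | true =>
            have hc : cur = [] := by simpa [List.isEmpty_iff] using hcur
            subst hc
            simp [pvStepA, hs, pvReduceInter, pvBad, pvSetOf_ne_nil _ hs]
          | false =>
            have hred : (pvReduceInter cur).isEmpty = false := by
              simp [pvBad, hcur] at hbad; simp [hbad]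
            simp [pvStepA, hs, hred, pvBad, pvReduceInter_append, hcur]
      have hB : pvStepB (gs, cur) line = (gs, cur ++ [PySem.Str.strip line]) := by
        simp [pvStepB, hs]
      rw [hA, hB, ih]

-- ===== VERDICT (by name: the statement is the Claim_ definition above) =====
theorem parse_answers2_spec : Claim_equal_parse_answers2 := by
  intro lines _
  unfold Spec_parse_answers2 parse_answers2 parse_answers2_alt
  have h := pv_loop lines [] []
  simpa [pvEmit, pvReduceInter, pvBad] using h
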